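-- pv_equiv track=rewrite | github.com/Nikman800/Leetcode_Solutions | countBalancedSubarrays.py | countBalancedSubarrays
-- ===== SOURCE A (Python) =====
-- def countBalancedSubarrays(componentValue):
--
--     # Initialize totalCount and difference to 0
--     difference = 0
--     total_count = 0
--
--     # Initialize arrays to store frequency counts
--     # Use length + 1 to handle potential maximum difference
--     arr_size = len(componentValue)
--     positive = [0] * (arr_size + 1)
--     negative = [0] * (arr_size + 1)
--
--     # Initial difference is 0, so positive[0] will be 1
--     positive[0] = 1
--
--     for num in componentValue:
--         # Update difference based on whether number is odd or even
--         if num % 2 == 0:  # even number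
--             difference -= 1
--         else:  # odd number
--             difference += 1
--
--         # Handle negative and positive differences
--         if difference < 0:
--             # For negative differences, we look up in negative array
--             # but need to use positive index
--             abs_diff = abs(difference)
--             total_count += negative[abs_diff]
--             negative[abs_diff] += 1
--         else:
--             # For positive differences or zero, look up in positive array
--             total_count += positive[difference]
--             positive[difference] += 1
--
--     return total_count
-- ===== SOURCE B (Python) =====
-- def countBalancedSubarrays(componentValue):
--     # Phase 1: prefix parity differences (odd = +1, even = -1), including the empty prefix.
--     d = 0
--     prefix = [0]
--     for x in componentValue:
--         d += 1 if x % 2 else -1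
--         prefix.append(d)
--     # Phase 2: frequency of each prefix value.
--     freq = {}
--     for p in prefix:
--         freq[p] = freq.get(p, 0) + 1
--     # Phase 3: each group of c equal prefix values yields c*(c-1)//2 balanced subarrays.
--     return sum(c * (c - 1) // 2 for c in freq.values())
-- ===== Notes on version B (the rewrite author's own statement) =====
-- stated objective: alternative
-- what changed: Replaced A's single online pass with two sign-split frequency arrays by three separate phases: build the full prefix-difference list, group it with a plain counting dict, and combine each group in closed form as c*(c-1)//2.
import Mathlib
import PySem

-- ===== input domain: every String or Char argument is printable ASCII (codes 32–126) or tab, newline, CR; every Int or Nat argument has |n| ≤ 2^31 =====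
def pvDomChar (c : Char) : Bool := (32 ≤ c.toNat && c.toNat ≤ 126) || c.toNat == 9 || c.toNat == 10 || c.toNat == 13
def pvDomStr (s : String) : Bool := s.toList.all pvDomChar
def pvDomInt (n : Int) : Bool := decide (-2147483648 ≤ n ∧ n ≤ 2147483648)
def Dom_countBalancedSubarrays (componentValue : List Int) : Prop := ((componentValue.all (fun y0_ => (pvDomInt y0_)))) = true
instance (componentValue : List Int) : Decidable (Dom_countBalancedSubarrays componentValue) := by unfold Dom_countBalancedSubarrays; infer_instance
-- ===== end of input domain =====

-- B replaces A's single online pass with sign-split frequency arrays by three phases: prefix-difference list, counting dict, closed-form c*(c-1)//2 per group (alternative, same results).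


-- ===== PORT A =====
-- one loop step of A: update difference, then bump/count in the positive or negative frequency array
def pvStepA (st : Int × Int × List Int × List Int) (num : Int) : Int × Int × List Int × List Int :=
  let difference := st.1
  let total_count := st.2.1
  let positive := st.2.2.1
  let negative := st.2.2.2
  let difference := if PySem.Int.mod num 2 = 0 then difference - 1 else difference + 1
  if difference < 0 then
    let abs_diff := difference.natAbs
    let total_count := total_count + negative.getD abs_diff 0
    let negative := negative.set abs_diff (negative.getD abs_diff 0 + 1)
    (difference, total_count, positive, negative)
  else
    let total_count := total_count + positive.getD difference.toNat 0
    let positive := positive.set difference.toNat (positive.getD difference.toNat 0 + 1)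
    (difference, total_count, positive, negative)

def countBalancedSubarrays (componentValue : List Int) : Int :=
  let arr_size := componentValue.length
  let positive := (List.replicate (arr_size + 1) (0 : Int)).set 0 1
  let negative := List.replicate (arr_size + 1) (0 : Int)
  (componentValue.foldl pvStepA (0, 0, positive, negative)).2.1

-- ===== PORT B =====
-- phase 1 loop step of B: extend the running prefix-difference list
def pvPrefB (st : Int × List Int) (x : Int) : Int × List Int :=
  let d := st.1 + (if PySem.Int.mod x 2 ≠ 0 then (1 : Int) else -1)
  (d, st.2 ++ [d])

def countBalancedSubarrays_alt (componentValue : List Int) : Int :=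
  let pre := (componentValue.foldl pvPrefB (0, [(0 : Int)])).2
  let freq := pre.foldl (fun d p => d.insert p (d.getD p 0 + 1)) PySem.Dict.empty
  (freq.values.map (fun c => PySem.Int.floordiv (c * (c - 1)) 2)).sum

-- ===== PRECONDITION & SPEC =====
def Spec_countBalancedSubarrays (componentValue : List Int) (out : Int) : Prop := out = countBalancedSubarrays_alt componentValue
instance (componentValue : List Int) (out : Int) : Decidable (Spec_countBalancedSubarrays componentValue out) := by unfold Spec_countBalancedSubarrays; infer_instance

-- ===== CLAIM (what is proved, stated in full; the proofs are below) =====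
def Claim_equal_countBalancedSubarrays : Prop := ∀ (componentValue : List Int), Dom_countBalancedSubarrays componentValue → Spec_countBalancedSubarrays componentValue (countBalancedSubarrays componentValue)

-- ===== LEMMAS AND PROOFS =====

-- ±1 contribution of one element
def pvD (x : Int) : Int := if PySem.Int.mod x 2 = 0 then -1 else 1

-- prefix difference of a whole list
def pvPS (l : List Int) : Int := (l.map pvD).sum

-- number of i < j with prefix difference v
def pvC (l : List Int) (j : Nat) (v : Int) : Int :=
  ∑ i ∈ Finset.range j, (if pvPS (l.take i) = v then (1 : Int) else 0)

-- the common reference value: pairs i < j ≤ n of equal prefix differences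
def pvPairs (l : List Int) : Int :=
  ∑ j ∈ Finset.range (l.length + 1), pvC l j (pvPS (l.take j))

-- combined lookup into A's two frequency arrays
def pvLook (pos neg : List Int) (v : Int) : Int :=
  if v < 0 then neg.getD v.natAbs 0 else pos.getD v.toNat 0

theorem pvPS_append (p q : List Int) : pvPS (p ++ q) = pvPS p + pvPS q := by
  simp [pvPS]

theorem pvPS_abs_le (l : List Int) : (pvPS l).natAbs ≤ l.length := by
  induction l with
  | nil => simp [pvPS]
  | cons x t ih =>
      have : pvPS (x :: t) = pvD x + pvPS t := by simp [pvPS]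
      rw [this]
      have hx : pvD x = -1 ∨ pvD x = 1 := by unfold pvD; split <;> simp
      rcases hx with h | h <;> rw [h] <;> simp <;> omega

theorem pvD_eq (x : Int) : (if PySem.Int.mod x 2 ≠ 0 then (1 : Int) else -1) = pvD x := by
  unfold pvD
  by_cases h : PySem.Int.mod x 2 = 0
  · rw [if_pos h, if_neg (by simp only [ne_eq, not_not]; exact h)]
  · rw [if_neg h, if_pos h]

theorem pvPS_cons (x : Int) (t : List Int) : pvPS (x :: t) = pvD x + pvPS t := by
  simp [pvPS]

-- phase 1 of B builds the list of prefix differences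
theorem pvPref_fold (r : List Int) : ∀ (d : Int) (acc : List Int),
    (r.foldl pvPrefB (d, acc)).2
      = acc ++ (List.range r.length).map (fun k => d + pvPS (r.take (k + 1))) := by
  induction r with
  | nil => intro d acc; simp
  | cons x t ih =>
      intro d acc
      have hstep : pvPrefB (d, acc) x = (d + pvD x, acc ++ [d + pvD x]) := by
        show (d + (if PySem.Int.mod x 2 ≠ 0 then (1 : Int) else -1),
          acc ++ [d + (if PySem.Int.mod x 2 ≠ 0 then (1 : Int) else -1)]) = _
        rw [pvD_eq]
      rw [List.foldl_cons, hstep, ih]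
      rw [List.length_cons, List.range_succ_eq_map, List.map_cons, List.map_map]
      simp only [List.take_succ_cons, pvPS_cons, Function.comp_def, List.take_zero]
      rw [show pvPS [] = 0 by rfl, List.append_assoc]
      simp [add_assoc]

theorem pvPrefix_eq (l : List Int) :
    (l.foldl pvPrefB (0, [(0 : Int)])).2
      = (List.range (l.length + 1)).map (fun k => pvPS (l.take k)) := by
  rw [pvPref_fold]
  rw [List.range_succ_eq_map, List.map_cons, List.map_map]
  simp [pvPS, Function.comp_def]

-- an indicator sum over positions is a count
theorem pvCount_ind (L : List Int) (x : Int) :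
    (∑ i ∈ Finset.range L.length, if L.getD i 0 = x then (1 : Int) else 0)
      = (L.count x : Int) := by
  induction L with
  | nil => simp
  | cons y t ih =>
      rw [List.length_cons, Finset.sum_range_succ']
      simp only [List.getD_cons_succ, List.getD_cons_zero]
      rw [ih, List.count_cons]
      push_cast
      by_cases h : y = x
      · rw [if_pos h, if_pos (by simp [h])]
      · rw [if_neg h, if_neg (by simp [h])]

-- the closed form grows by the old count when one more equal value arrives
theorem pvChoose_step (c : Int) :
    ((c + 1) * (c + 1 - 1)) / 2 = (c * (c - 1)) / 2 + c := by
  have h := Int.even_mul_succ_self (c - 1)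
  rw [show (c - 1) + 1 = c by ring] at h
  obtain ⟨k, hk⟩ := h
  have h2 : (c + 1) * (c + 1 - 1) = (c - 1) * c + 2 * c := by ring
  have h3 : c * (c - 1) = (c - 1) * c := by ring
  rw [h2, h3]
  omega

-- pairs of equal positions = sum over distinct values of (count choose 2)
theorem pvG_eq (L : List Int) :
    (∑ j ∈ Finset.range L.length, ∑ i ∈ Finset.range j,
        if L.getD i 0 = L.getD j 0 then (1 : Int) else 0)
      = ∑ v ∈ L.toFinset, ((L.count v : Int) * ((L.count v : Int) - 1)) / 2 := by
  induction L using List.reverseRecOn with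
  | nil => simp
  | append_singleton L x ih =>
      rw [show (L ++ [x]).length = L.length + 1 by simp, Finset.sum_range_succ]
      have hold : ∀ j ∈ Finset.range L.length,
          (∑ i ∈ Finset.range j, if (L ++ [x]).getD i 0 = (L ++ [x]).getD j 0 then (1 : Int) else 0)
            = ∑ i ∈ Finset.range j, if L.getD i 0 = L.getD j 0 then (1 : Int) else 0 := by
        intro j hj
        have hj' := Finset.mem_range.mp hj
        refine Finset.sum_congr rfl ?_
        intro i hi
        have hi' := Finset.mem_range.mp hi
        rw [List.getD_append L [x] 0 i (by omega), List.getD_append L [x] 0 j hj']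
      rw [Finset.sum_congr rfl hold, ih]
      have hx : (L ++ [x]).getD L.length 0 = x := by
        simp [List.getD_eq_getElem?_getD]
      have hnew : (∑ i ∈ Finset.range L.length,
          if (L ++ [x]).getD i 0 = (L ++ [x]).getD L.length 0 then (1 : Int) else 0)
            = (L.count x : Int) := by
        rw [← pvCount_ind L x]
        refine Finset.sum_congr rfl ?_
        intro i hi
        have hi' := Finset.mem_range.mp hi
        rw [List.getD_append L [x] 0 i hi', hx]
      rw [hnew]
      have hcnt : ∀ v : Int, ((L ++ [x]).count v : Int)
          = (L.count v : Int) + (if x = v then (1 : Int) else 0) := by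
        intro v
        rw [List.count_append]
        push_cast
        by_cases h : x = v
        · rw [if_pos h, h]; simp
        · rw [if_neg h]
          rw [show ([x].count v : Int) = 0 by simp [List.count_singleton, h]]
      have htof : (L ++ [x]).toFinset = insert x L.toFinset := by
        simp [List.toFinset_append, Finset.union_comm]
      rw [htof]
      by_cases hmem : x ∈ L
      · have hS : insert x L.toFinset = L.toFinset := by
          exact Finset.insert_eq_self.mpr (List.mem_toFinset.mpr hmem)
        rw [hS]
        have hxS : x ∈ L.toFinset := List.mem_toFinset.mpr hmem
        rw [← Finset.add_sum_erase _ _ hxS, ← Finset.add_sum_erase _ _ hxS]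
        have herase : ∀ v ∈ L.toFinset.erase x,
            (((L ++ [x]).count v : Int) * (((L ++ [x]).count v : Int) - 1)) / 2
              = ((L.count v : Int) * ((L.count v : Int) - 1)) / 2 := by
          intro v hv
          have hvx : x ≠ v := fun h => (Finset.ne_of_mem_erase hv) h.symm
          rw [hcnt v, if_neg hvx, add_zero]
        rw [Finset.sum_congr rfl herase]
        rw [hcnt x, if_pos rfl]
        rw [pvChoose_step]
        ring
      · have hxS : x ∉ L.toFinset := fun h => hmem (List.mem_toFinset.mp h)
        rw [Finset.sum_insert hxS]
        have hc0 : (L.count x : Int) = 0 := by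
          simp [List.count_eq_zero_of_not_mem hmem]
        have hrest : ∀ v ∈ L.toFinset,
            (((L ++ [x]).count v : Int) * (((L ++ [x]).count v : Int) - 1)) / 2
              = ((L.count v : Int) * ((L.count v : Int) - 1)) / 2 := by
          intro v hv
          have hvx : x ≠ v := by
            intro h; exact hxS (h ▸ hv)
          rw [hcnt v, if_neg hvx, add_zero]
        rw [Finset.sum_congr rfl hrest]
        rw [hcnt x, if_pos rfl, hc0]
        norm_num

theorem countBalancedSubarrays_alt_eq_pairs (l : List Int) :
    countBalancedSubarrays_alt l = pvPairs l := by
  show ((((l.foldl pvPrefB (0, [(0 : Int)])).2.foldl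
      (fun d p => d.insert p (d.getD p 0 + 1)) PySem.Dict.empty).values).map
      (fun c => PySem.Int.floordiv (c * (c - 1)) 2)).sum = pvPairs l
  rw [PySem.Dict.foldl_insert_getD_add_one_eq_counter, pvPrefix_eq]
  have hP : ∀ (P : List Int),
      (((PySem.Dict.counter P).values).map (fun c => PySem.Int.floordiv (c * (c - 1)) 2)).sum
        = ∑ v ∈ P.toFinset, ((P.count v : Int) * ((P.count v : Int) - 1)) / 2 := by
    intro P
    have hv : (PySem.Dict.counter P).values
        = (PySem.Set.ofList P).map (fun k => ((P.count k : Int))) := by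
      show (PySem.Dict.counter P).items.map (·.2) = _
      rw [PySem.Dict.items_counter, List.map_map]
      rfl
    rw [hv, List.map_map]
    have hfd : ((fun c => PySem.Int.floordiv (c * (c - 1)) 2) ∘ fun k => ((P.count k : Int)))
        = fun k => ((P.count k : Int) * ((P.count k : Int) - 1)) / 2 := by
      funext k
      simp only [Function.comp_def]
      exact PySem.Int.floordiv_eq_ediv_of_pos (by norm_num)
    rw [hfd]
    rw [← List.sum_toFinset _ (PySem.Set.nodup_ofList P)]
    refine Finset.sum_congr ?_ (fun _ _ => rfl)
    ext v
    simp [List.mem_toFinset, PySem.Set.mem_ofList]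
  rw [hP, ← pvG_eq]
  unfold pvPairs pvC
  rw [show ((List.range (l.length + 1)).map (fun k => pvPS (l.take k))).length = l.length + 1
    by simp]
  refine Finset.sum_congr rfl ?_
  intro j hj
  have hj' := Finset.mem_range.mp hj
  refine Finset.sum_congr rfl ?_
  intro i hi
  have hi' := Finset.mem_range.mp hi
  rw [PySem.List.getD_map_range _ _ _ _ (by omega), PySem.List.getD_map_range _ _ _ _ hj']

theorem pvGetD_set_self (xs : List Int) (i : Nat) (v : Int) (h : i < xs.length) :
    (xs.set i v).getD i 0 = v := by
  simp [List.getD_eq_getElem?_getD, List.getElem?_set_self, h]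

theorem pvGetD_set_ne (xs : List Int) (i j : Nat) (v : Int) (h : i ≠ j) :
    (xs.set i v).getD j 0 = xs.getD j 0 := by
  simp [List.getD_eq_getElem?_getD, List.getElem?_set_ne h]

theorem pvGetD_replicate (n j : Nat) : (List.replicate n (0 : Int)).getD j 0 = 0 := by
  simp only [List.getD_eq_getElem?_getD, List.getElem?_replicate]
  split <;> rfl

theorem pvC_succ (l : List Int) (m : Nat) (v : Int) :
    pvC l (m + 1) v = pvC l m v + (if pvPS (l.take m) = v then (1 : Int) else 0) := by
  unfold pvC; rw [Finset.sum_range_succ]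

theorem pvC_prefix (p q : List Int) (j : Nat) (v : Int) (h : j ≤ p.length + 1) :
    pvC (p ++ q) j v = pvC p j v := by
  unfold pvC
  refine Finset.sum_congr rfl ?_
  intro i hi
  have hi' : i ≤ p.length := by
    have := Finset.mem_range.mp hi; omega
  rw [List.take_append_of_le_length hi']

theorem pvA_loop (r : List Int) : ∀ (p : List Int) (T : Int) (pos neg : List Int),
    pos.length = (p ++ r).length + 1 → neg.length = (p ++ r).length + 1 →
    (∀ v : Int, pvLook pos neg v = pvC p (p.length + 1) v) →
    (r.foldl pvStepA (pvPS p, T, pos, neg)).2.1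
      = T + ∑ j ∈ Finset.Ico (p.length + 1) ((p ++ r).length + 1),
          pvC (p ++ r) j (pvPS ((p ++ r).take j)) := by
  induction r with
  | nil => intro p T pos neg _ _ _; simp
  | cons x r' ih =>
    intro p T pos neg hpos hneg hlook
    have hDx : pvPS (p ++ [x]) = pvPS p + pvD x := by rw [pvPS_append]; simp [pvPS]
    have habs : (pvPS (p ++ [x])).natAbs ≤ p.length + 1 := by
      have h1 := pvPS_abs_le (p ++ [x])
      simp only [List.length_append, List.length_cons, List.length_nil] at h1
      omega
    have hlen : (p ++ x :: r').length = p.length + 1 + r'.length := by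
      rw [List.length_append, List.length_cons]; omega
    have hD : (if PySem.Int.mod x 2 = 0 then pvPS p - 1 else pvPS p + 1) = pvPS (p ++ [x]) := by
      rw [hDx]; unfold pvD; split <;> ring
    have hstep : pvStepA (pvPS p, T, pos, neg) x =
        if pvPS (p ++ [x]) < 0 then
          (pvPS (p ++ [x]), T + neg.getD (pvPS (p ++ [x])).natAbs 0, pos,
            neg.set (pvPS (p ++ [x])).natAbs (neg.getD (pvPS (p ++ [x])).natAbs 0 + 1))
        else
          (pvPS (p ++ [x]), T + pos.getD (pvPS (p ++ [x])).toNat 0,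
            pos.set (pvPS (p ++ [x])).toNat (pos.getD (pvPS (p ++ [x])).toNat 0 + 1), neg) := by
      simp only [pvStepA]
      rw [hD]
    have hCnew : ∀ v : Int, pvC (p ++ [x]) (p.length + 1 + 1) v
        = pvC p (p.length + 1) v + (if pvPS (p ++ [x]) = v then (1 : Int) else 0) := by
      intro v
      rw [pvC_succ]
      congr 1
      · exact pvC_prefix p [x] (p.length + 1) v (le_refl _)
      · rw [List.take_of_length_le (by simp)]
    have hlen2 : (p ++ [x]).length + 1 = p.length + 1 + 1 := by simp
    rw [List.foldl_cons, hstep]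
    by_cases hsign : pvPS (p ++ [x]) < 0
    · rw [if_pos hsign]
      have hadd : neg.getD (pvPS (p ++ [x])).natAbs 0 = pvC p (p.length + 1) (pvPS (p ++ [x])) := by
        have h2 := hlook (pvPS (p ++ [x]))
        rw [pvLook, if_pos hsign] at h2
        exact h2
      have hlook' : ∀ v : Int,
          pvLook pos (neg.set (pvPS (p ++ [x])).natAbs (neg.getD (pvPS (p ++ [x])).natAbs 0 + 1)) v
            = pvC (p ++ [x]) ((p ++ [x]).length + 1) v := by
        intro v
        rw [hlen2, hCnew v]
        by_cases hv : v < 0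
        · rw [pvLook, if_pos hv]
          by_cases hveq : v = pvPS (p ++ [x])
          · subst hveq
            rw [pvGetD_set_self _ _ _ (by omega), if_pos rfl]
            have h2 := hlook (pvPS (p ++ [x]))
            rw [pvLook, if_pos hv] at h2
            rw [h2]
          · have hne : (pvPS (p ++ [x])).natAbs ≠ v.natAbs := by omega
            rw [pvGetD_set_ne _ _ _ _ hne]
            have h2 := hlook v
            rw [pvLook, if_pos hv] at h2
            rw [h2, if_neg (by omega), add_zero]
        · rw [pvLook, if_neg hv]
          have h2 := hlook v
          rw [pvLook, if_neg hv] at h2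
          rw [h2, if_neg (by omega), add_zero]
      have hih := ih (p ++ [x]) (T + neg.getD (pvPS (p ++ [x])).natAbs 0) pos
        (neg.set (pvPS (p ++ [x])).natAbs (neg.getD (pvPS (p ++ [x])).natAbs 0 + 1))
        (by simp at hpos ⊢; omega) (by simp at hneg ⊢; omega) hlook'
      rw [hih, hadd]
      have hassoc : (p ++ [x]) ++ r' = p ++ x :: r' := by simp
      rw [hassoc, hlen2]
      rw [Finset.sum_eq_sum_Ico_succ_bot (a := p.length + 1) (b := (p ++ x :: r').length + 1)
        (by rw [hlen]; omega)]
      have htk : (p ++ x :: r').take (p.length + 1) = p ++ [x] := by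
        rw [show p ++ x :: r' = (p ++ [x]) ++ r' by simp]
        exact List.take_left' (by simp)
      rw [htk]
      rw [pvC_prefix p (x :: r') (p.length + 1) (pvPS (p ++ [x])) (le_refl _)]
      ring
    · rw [if_neg hsign]
      have hadd : pos.getD (pvPS (p ++ [x])).toNat 0 = pvC p (p.length + 1) (pvPS (p ++ [x])) := by
        have h2 := hlook (pvPS (p ++ [x]))
        rw [pvLook, if_neg hsign] at h2
        exact h2
      have hlook' : ∀ v : Int,
          pvLook (pos.set (pvPS (p ++ [x])).toNat (pos.getD (pvPS (p ++ [x])).toNat 0 + 1)) neg v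
            = pvC (p ++ [x]) ((p ++ [x]).length + 1) v := by
        intro v
        rw [hlen2, hCnew v]
        by_cases hv : v < 0
        · rw [pvLook, if_pos hv]
          have h2 := hlook v
          rw [pvLook, if_pos hv] at h2
          rw [h2, if_neg (by omega), add_zero]
        · rw [pvLook, if_neg hv]
          by_cases hveq : v = pvPS (p ++ [x])
          · subst hveq
            rw [pvGetD_set_self _ _ _ (by omega), if_pos rfl]
            have h2 := hlook (pvPS (p ++ [x]))
            rw [pvLook, if_neg hv] at h2
            rw [h2]
          · have hne : (pvPS (p ++ [x])).toNat ≠ v.toNat := by omega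
            rw [pvGetD_set_ne _ _ _ _ hne]
            have h2 := hlook v
            rw [pvLook, if_neg hv] at h2
            rw [h2, if_neg (by omega), add_zero]
      have hih := ih (p ++ [x]) (T + pos.getD (pvPS (p ++ [x])).toNat 0)
        (pos.set (pvPS (p ++ [x])).toNat (pos.getD (pvPS (p ++ [x])).toNat 0 + 1)) neg
        (by simp at hpos ⊢; omega) (by simp at hneg ⊢; omega) hlook'
      rw [hih, hadd]
      have hassoc : (p ++ [x]) ++ r' = p ++ x :: r' := by simp
      rw [hassoc, hlen2]
      rw [Finset.sum_eq_sum_Ico_succ_bot (a := p.length + 1) (b := (p ++ x :: r').length + 1)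
        (by rw [hlen]; omega)]
      have htk : (p ++ x :: r').take (p.length + 1) = p ++ [x] := by
        rw [show p ++ x :: r' = (p ++ [x]) ++ r' by simp]
        exact List.take_left' (by simp)
      rw [htk]
      rw [pvC_prefix p (x :: r') (p.length + 1) (pvPS (p ++ [x])) (le_refl _)]
      ring

theorem countBalancedSubarrays_eq_pairs (l : List Int) :
    countBalancedSubarrays l = pvPairs l := by
  show ((l.foldl pvStepA (0, 0, (List.replicate (l.length + 1) (0 : Int)).set 0 1,
      List.replicate (l.length + 1) (0 : Int))).2.1) = pvPairs l
  have hlook0 : ∀ v : Int,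
      pvLook ((List.replicate (l.length + 1) (0 : Int)).set 0 1)
        (List.replicate (l.length + 1) (0 : Int)) v = pvC ([] : List Int) (([] : List Int).length + 1) v := by
    intro v
    have hC : pvC [] 1 v = (if (0 : Int) = v then (1 : Int) else 0) := by
      unfold pvC
      rw [Finset.sum_range_one]
      simp [pvPS]
    by_cases hv : v < 0
    · rw [pvLook, if_pos hv]
      simp only [List.length_nil, Nat.zero_add, hC]
      rw [pvGetD_replicate, if_neg (by omega)]
    · rw [pvLook, if_neg hv]
      by_cases hv0 : v = 0
      · subst hv0
        simp only [List.length_nil, Nat.zero_add, hC]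
        rw [show (0 : Int).toNat = 0 by rfl, pvGetD_set_self _ _ _ (by simp)]
        simp
      · simp only [List.length_nil, Nat.zero_add, hC]
        rw [pvGetD_set_ne _ _ _ _ (by omega), pvGetD_replicate, if_neg (by omega)]
  have h := pvA_loop l [] 0 ((List.replicate (l.length + 1) (0 : Int)).set 0 1)
    (List.replicate (l.length + 1) (0 : Int)) (by simp) (by simp) hlook0
  rw [show pvPS [] = 0 by rfl] at h
  simp only [List.nil_append, List.length_nil, Nat.zero_add] at h
  rw [h, zero_add]
  unfold pvPairs
  rw [Finset.range_eq_Ico]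
  rw [Finset.sum_eq_sum_Ico_succ_bot (a := 0) (b := l.length + 1) (by omega)]
  rw [show pvC l 0 (pvPS (l.take 0)) = 0 by simp [pvC]]
  norm_num

-- ===== VERDICT (by name: the statement is the Claim_ definition above) =====
theorem countBalancedSubarrays_spec : Claim_equal_countBalancedSubarrays := by
  intro l _
  unfold Spec_countBalancedSubarrays
  rw [countBalancedSubarrays_eq_pairs, countBalancedSubarrays_alt_eq_pairs]
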